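-- pv_equiv track=rewrite | github.com/Rowdovsky/git-learning | app/ansible_service.py | parse_show_version
-- ===== SOURCE A (Python) =====
-- def parse_show_version(show_version_text: str):
--     """
--     Extrae modelo, versión de IOS y número de serie de 'show version'
--     para IOS clásico (routers C2900 y switches C3750, etc.).
--     """
--     modelo = ""
--     ios_version = ""
--     serial = ""
--
--     for line in show_version_text.splitlines():
--         line = line.strip()
--
--         # Versión de IOS
--         if "Cisco IOS Software" in line and "Version" in line:
--             partes = line.split("Version")
--             if len(partes) > 1:
--                 ios_version = partes[1].split(",")[0].strip()
--
--         # Modelo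
--         if "bytes of memory" in line and ("cisco" in line.lower()):
--             tokens = line.split()
--             if len(tokens) >= 2:
--                 modelo = tokens[1]
--
--         # Serial
--         if "Processor board ID" in line:
--             serial = line.split("Processor board ID")[-1].strip()
--         elif "System serial number" in line and ":" in line:
--             serial = line.split(":")[-1].strip()
--
--     return modelo, ios_version, serial
-- ===== SOURCE B (Python) =====
-- def _ios(ln):
--     if "Cisco IOS Software" in ln and "Version" in ln:
--         partes = ln.split("Version")
--         if len(partes) > 1:
--             return partes[1].split(",")[0].strip()
--     return None
--
-- def _modelo(ln):
--     if "bytes of memory" in ln and "cisco" in ln.lower():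
--         tokens = ln.split()
--         if len(tokens) >= 2:
--             return tokens[1]
--     return None
--
-- def _serial(ln):
--     if "Processor board ID" in ln:
--         return ln.split("Processor board ID")[-1].strip()
--     if "System serial number" in ln and ":" in ln:
--         return ln.split(":")[-1].strip()
--     return None
--
-- def _first(rlines, f):
--     for ln in rlines:
--         v = f(ln)
--         if v is not None:
--             return v
--     return ""
--
-- def parse_show_version(show_version_text: str):
--     rlines = [ln.strip() for ln in show_version_text.splitlines()][::-1]
--     return _first(rlines, _modelo), _first(rlines, _ios), _first(rlines, _serial)
-- ===== Notes on version B (the rewrite author's own statement) =====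
-- stated objective: alternative
-- what changed: A's single forward pass that carries three mutable fields and overwrites them on every matching line is replaced by three independent backward scans over the stripped lines, each returning at its first (i.e. last-in-text) matching line.
import Mathlib
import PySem

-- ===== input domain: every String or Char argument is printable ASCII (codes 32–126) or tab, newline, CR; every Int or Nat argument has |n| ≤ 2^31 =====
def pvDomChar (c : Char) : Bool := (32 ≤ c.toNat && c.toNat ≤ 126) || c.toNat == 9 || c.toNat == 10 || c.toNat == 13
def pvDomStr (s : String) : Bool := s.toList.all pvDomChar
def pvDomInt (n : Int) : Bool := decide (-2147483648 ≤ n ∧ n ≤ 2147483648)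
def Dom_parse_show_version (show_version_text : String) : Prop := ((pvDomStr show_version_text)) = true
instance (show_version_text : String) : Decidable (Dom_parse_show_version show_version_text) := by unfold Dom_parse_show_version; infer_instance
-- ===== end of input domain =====

-- B replaces A's forward fold over three mutable fields by three independent backward scans (first match from the end wins); equal return values proved below.

-- ===== PORT A =====
def parse_show_version (show_version_text : String) : String × String × String :=
  (PySem.Str.splitlines show_version_text).foldl
    (fun st line0 =>
      let line := PySem.Str.strip line0
      let ios_version :=
        if PySem.Str.isIn "Cisco IOS Software" line && PySem.Str.isIn "Version" line then
          let partes := (PySem.Str.split? line "Version").getD []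
          if 1 < partes.length then
            PySem.Str.strip (((PySem.Str.split? (partes.getD 1 "") ",").getD []).headD "")
          else st.2.1
        else st.2.1
      let modelo :=
        if PySem.Str.isIn "bytes of memory" line && PySem.Str.isIn "cisco" (PySem.Str.lower line) then
          let tokens := PySem.Str.split₀ line
          if 2 ≤ tokens.length then tokens.getD 1 "" else st.1
        else st.1
      let serial :=
        if PySem.Str.isIn "Processor board ID" line then
          PySem.Str.strip (((PySem.Str.split? line "Processor board ID").getD []).getLastD "")
        else if PySem.Str.isIn "System serial number" line && PySem.Str.isIn ":" line then
          PySem.Str.strip (((PySem.Str.split? line ":").getD []).getLastD "")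
        else st.2.2
      (modelo, ios_version, serial))
    ("", "", "")

-- ===== PORT B =====
def pvUpdIos (line : String) : Option String :=
  if PySem.Str.isIn "Cisco IOS Software" line && PySem.Str.isIn "Version" line then
    let partes := (PySem.Str.split? line "Version").getD []
    if 1 < partes.length then
      some (PySem.Str.strip (((PySem.Str.split? (partes.getD 1 "") ",").getD []).headD ""))
    else none
  else none

def pvUpdModelo (line : String) : Option String :=
  if PySem.Str.isIn "bytes of memory" line && PySem.Str.isIn "cisco" (PySem.Str.lower line) then
    let tokens := PySem.Str.split₀ line
    if 2 ≤ tokens.length then some (tokens.getD 1 "") else none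
  else none

def pvUpdSerial (line : String) : Option String :=
  if PySem.Str.isIn "Processor board ID" line then
    some (PySem.Str.strip (((PySem.Str.split? line "Processor board ID").getD []).getLastD ""))
  else if PySem.Str.isIn "System serial number" line && PySem.Str.isIn ":" line then
    some (PySem.Str.strip (((PySem.Str.split? line ":").getD []).getLastD ""))
  else none

def pvFirst (f : String → Option String) : List String → String
  | [] => ""
  | ln :: rest =>
    match f ln with
    | some v => v
    | none => pvFirst f rest

def parse_show_version_alt (show_version_text : String) : String × String × String :=
  let rlines := ((PySem.Str.splitlines show_version_text).map PySem.Str.strip).reverse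
  (pvFirst pvUpdModelo rlines, pvFirst pvUpdIos rlines, pvFirst pvUpdSerial rlines)

-- ===== PRECONDITION & SPEC =====
def Spec_parse_show_version (show_version_text : String) (out : String × String × String) : Prop := out = parse_show_version_alt show_version_text
instance (show_version_text : String) (out : String × String × String) : Decidable (Spec_parse_show_version show_version_text out) := by unfold Spec_parse_show_version; infer_instance

-- ===== CLAIM (what is proved, stated in full; the proofs are below) =====
def Claim_equal_parse_show_version : Prop := ∀ (show_version_text : String), Dom_parse_show_version show_version_text → Spec_parse_show_version show_version_text (parse_show_version show_version_text)

-- ===== LEMMAS AND PROOFS =====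

-- A's loop body on an already-stripped line (proof-side helper).
def pvStep (st : String × String × String) (line : String) : String × String × String :=
  let ios_version :=
    if PySem.Str.isIn "Cisco IOS Software" line && PySem.Str.isIn "Version" line then
      let partes := (PySem.Str.split? line "Version").getD []
      if 1 < partes.length then
        PySem.Str.strip (((PySem.Str.split? (partes.getD 1 "") ",").getD []).headD "")
      else st.2.1
    else st.2.1
  let modelo :=
    if PySem.Str.isIn "bytes of memory" line && PySem.Str.isIn "cisco" (PySem.Str.lower line) then
      let tokens := PySem.Str.split₀ line
      if 2 ≤ tokens.length then tokens.getD 1 "" else st.1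
    else st.1
  let serial :=
    if PySem.Str.isIn "Processor board ID" line then
      PySem.Str.strip (((PySem.Str.split? line "Processor board ID").getD []).getLastD "")
    else if PySem.Str.isIn "System serial number" line && PySem.Str.isIn ":" line then
      PySem.Str.strip (((PySem.Str.split? line ":").getD []).getLastD "")
    else st.2.2
  (modelo, ios_version, serial)

lemma A_eq_foldl_pvStep (s : String) :
    parse_show_version s = ((PySem.Str.splitlines s).map PySem.Str.strip).foldl pvStep ("", "", "") := by
  unfold parse_show_version
  rw [List.foldl_map]
  rfl

lemma pvStep_eq (st : String × String × String) (line : String) :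
    pvStep st line =
      ((pvUpdModelo line).getD st.1, (pvUpdIos line).getD st.2.1, (pvUpdSerial line).getD st.2.2) := by
  obtain ⟨m, v, r⟩ := st
  simp only [pvStep, pvUpdModelo, pvUpdIos, pvUpdSerial]
  split_ifs <;> rfl

lemma getD_findSome?_concat (u : String → Option String) (l : List String) (hd a : String) :
    ((l ++ [hd]).findSome? u).getD a = (l.findSome? u).getD ((u hd).getD a) := by
  rw [List.findSome?_append]
  cases h : l.findSome? u <;> cases h2 : u hd <;> simp [h2]

lemma foldl_pvStep (l : List String) (a b c : String) :
    l.foldl pvStep (a, b, c) =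
      ((l.reverse.findSome? pvUpdModelo).getD a,
       (l.reverse.findSome? pvUpdIos).getD b,
       (l.reverse.findSome? pvUpdSerial).getD c) := by
  induction l generalizing a b c with
  | nil => simp
  | cons hd tl ih =>
    rw [List.foldl_cons, pvStep_eq, ih, List.reverse_cons,
        getD_findSome?_concat, getD_findSome?_concat, getD_findSome?_concat]

lemma pvFirst_eq (f : String → Option String) (l : List String) :
    pvFirst f l = (l.findSome? f).getD "" := by
  induction l with
  | nil => rfl
  | cons hd tl ih =>
    simp only [pvFirst, List.findSome?_cons]
    cases f hd <;> simp [ih]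

-- ===== VERDICT (by name: the statement is the Claim_ definition above) =====
theorem parse_show_version_spec : Claim_equal_parse_show_version := by
  intro s _
  unfold Spec_parse_show_version parse_show_version_alt
  rw [A_eq_foldl_pvStep, foldl_pvStep]
  simp only [pvFirst_eq]
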